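-- pv_equiv track=rewrite | github.com/onurkarabulut/prog-lab | Vize-Örnek6.py | fonk
-- ===== SOURCE A (Python) =====
-- import math
--
-- def fonk(kel):
--     b=[]
--     x=0
--     b=list(kel)
--     n=int(math.sqrt(len(b)))
--     c=[]
--     for i in range(n):
--         c.append([])
--         for j in range(n):
--             c[i].append(b[x])
--             x+=1
--     return c
-- ===== SOURCE B (Python) =====
-- import math
--
-- def fonk(kel):
--     n = int(math.sqrt(len(kel)))
--     return [list(kel[i*n:(i+1)*n]) for i in range(n)]
-- ===== Notes on version B (the rewrite author's own statement) =====
-- stated objective: simpler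
-- what changed: Replaces the nested double loop with a manual running cell index by a single comprehension that slices the string into n consecutive rows of length n.
import Mathlib
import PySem

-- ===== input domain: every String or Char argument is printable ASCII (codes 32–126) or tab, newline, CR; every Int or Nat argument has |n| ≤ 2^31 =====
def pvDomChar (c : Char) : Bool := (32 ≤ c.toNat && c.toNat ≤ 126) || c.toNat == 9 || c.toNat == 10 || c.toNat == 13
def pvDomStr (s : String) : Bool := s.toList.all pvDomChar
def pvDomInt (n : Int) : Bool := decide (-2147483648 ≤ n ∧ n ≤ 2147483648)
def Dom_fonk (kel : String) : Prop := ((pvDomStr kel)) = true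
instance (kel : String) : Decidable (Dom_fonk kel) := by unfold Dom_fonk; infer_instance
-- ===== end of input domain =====

-- B replaces A's nested cell-by-cell loop (running index x) by slicing the string into n
-- consecutive rows of length n (objective: simpler).
-- Note: both ports render Python's int(math.sqrt(len(..))) as Nat.sqrt, exact for the
-- string lengths the checks draw (float sqrt is exact there).


-- ===== PORT A =====
-- b = list(kel); n = int(sqrt(len(b))); nested loop appending b[x], x += 1.
-- b[x] is always in range (x < n*n ≤ len b), so the IndexError branch (pyGet? = none) is dead;
-- .getD "" only totalises it.
def fonk (kel : String) : List (List String) :=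
  let b : List String := kel.toList.map (fun ch => String.ofList [ch])
  let n : Nat := Nat.sqrt b.length
  ((List.range n).foldl
    (fun (acc : List (List String) × Nat) (_i : Nat) =>
      let inner := (List.range n).foldl
        (fun (acc2 : List String × Nat) (_j : Nat) =>
          (acc2.1 ++ [(PySem.List.pyGet? b ((acc2.2 : Nat) : Int)).getD ""], acc2.2 + 1))
        ([], acc.2)
      (acc.1 ++ [inner.1], inner.2))
    ([], 0)).1

-- ===== PORT B =====
-- n = int(sqrt(len(kel))); [list(kel[i*n:(i+1)*n]) for i in range(n)]
def fonk_alt (kel : String) : List (List String) :=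
  let n : Nat := Nat.sqrt kel.toList.length
  (List.range n).map (fun i =>
    (PySem.List.slice kel.toList (some ((i * n : Nat) : Int)) (some (((i + 1) * n : Nat) : Int))).map
      (fun ch => String.ofList [ch]))

-- ===== PRECONDITION & SPEC =====
def Spec_fonk (kel : String) (out : List (List String)) : Prop := out = fonk_alt kel
instance (kel : String) (out : List (List String)) : Decidable (Spec_fonk kel out) := by unfold Spec_fonk; infer_instance

-- ===== CLAIM (what is proved, stated in full; the proofs are below) =====
def Claim_equal_fonk : Prop := ∀ (kel : String), Dom_fonk kel → Spec_fonk kel (fonk kel)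

-- ===== LEMMAS AND PROOFS =====

-- a window of n successive getD-lookups starting at a is drop/take, when fully in range
lemma window {α : Type} (l : List α) (a n : Nat) (h : a + n ≤ l.length) (d : α) :
    (List.range n).map (fun j => (l[a + j]?).getD d) = (l.drop a).take n := by
  apply List.ext_getElem
  · simp; omega
  · intro i h1 h2
    have hi : i < n := by simpa using h1
    have hlt : a + i < l.length := by omega
    simp [hlt]

-- the inner loop appends the n cells b[x..x+n) to the row and advances x by n
lemma inner_loop (b : List String) (k : Nat) : ∀ (x : Nat) (row : List String),
    (List.range k).foldl
      (fun (acc2 : List String × Nat) (_j : Nat) =>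
        (acc2.1 ++ [(PySem.List.pyGet? b ((acc2.2 : Nat) : Int)).getD ""], acc2.2 + 1))
      (row, x)
    = (row ++ (List.range k).map (fun j => (b[x + j]?).getD ""), x + k) := by
  induction k with
  | zero => simp
  | succ m ih =>
    intro x row
    rw [List.range_succ]
    simp only [List.foldl_append, List.foldl_cons, List.foldl_nil, ih]
    rw [PySem.List.pyGet?_natCast, List.map_append]
    simp [List.append_assoc, Nat.add_assoc]

-- the outer loop after m iterations has built rows 0..m-1 and x = m*n
lemma outer_loop (b : List String) (n : Nat) : ∀ (m : Nat),
    (List.range m).foldl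
      (fun (acc : List (List String) × Nat) (_i : Nat) =>
        let inner := (List.range n).foldl
          (fun (acc2 : List String × Nat) (_j : Nat) =>
            (acc2.1 ++ [(PySem.List.pyGet? b ((acc2.2 : Nat) : Int)).getD ""], acc2.2 + 1))
          ([], acc.2)
        (acc.1 ++ [inner.1], inner.2))
      ([], 0)
    = ((List.range m).map (fun i =>
        (List.range n).map (fun j => (b[i * n + j]?).getD "")), m * n) := by
  intro m
  induction m with
  | zero => simp
  | succ p ih =>
    rw [List.range_succ, List.foldl_append, ih]
    simp only [List.foldl_cons, List.foldl_nil, inner_loop]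
    simp [List.map_append, Nat.succ_mul]

theorem fonk_spec : Claim_equal_fonk := by
  intro kel _
  unfold Spec_fonk fonk fonk_alt
  simp only []
  set cs := kel.toList with hcs
  set b : List String := cs.map (fun ch => String.ofList [ch]) with hb
  have hlen : b.length = cs.length := by simp [hb]
  rw [hlen]
  set n := Nat.sqrt cs.length with hn
  rw [outer_loop]
  apply List.map_congr_left
  intro i hi
  have hi' : i < n := List.mem_range.mp hi
  have hsq : n * n ≤ cs.length := by simpa [pow_two] using Nat.sqrt_le' cs.length
  have hrange : i * n + n ≤ cs.length := by
    have : (i + 1) * n ≤ n * n := Nat.mul_le_mul_right n hi'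
    calc i * n + n = (i + 1) * n := by ring
    _ ≤ n * n := this
    _ ≤ cs.length := hsq
  rw [PySem.List.slice_natCast]
  have harith : (i + 1) * n - i * n = n := by ring_nf; omega
  rw [harith]
  rw [List.map_take, List.map_drop, ← hb]
  exact window b (i * n) n (by omega) ""
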